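-- pv_equiv track=rewrite | github.com/oaoa9264/smart-test-knowledge-base | backend/app/services/impact_domain.py | compute_impact_domain
-- ===== SOURCE A (Python) =====
-- from collections import defaultdict
-- from typing import Any, Iterable, Set
--
-- def _get_field(item: Any, field: str, default=None):
--     if isinstance(item, dict):
--         return item.get(field, default)
--     return getattr(item, field, default)
--
-- def compute_impact_domain(changed_node_ids: Iterable[str], nodes: Iterable[Any]) -> Set[str]:
--     node_list = list(nodes)
--     node_ids = set()
--     parent_by_id = {}
--     children_by_parent = defaultdict(list)
--
--     for node in node_list:
--         node_id = _get_field(node, "id")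
--         if not node_id:
--             continue
--         node_ids.add(node_id)
--         parent_id = _get_field(node, "parent_id")
--         parent_by_id[node_id] = parent_id
--         if parent_id:
--             children_by_parent[parent_id].append(node_id)
--
--     impacted = set()
--
--     for changed_id in changed_node_ids or []:
--         if changed_id not in node_ids:
--             continue
--
--         impacted.add(changed_id)
--
--         current = parent_by_id.get(changed_id)
--         seen_up = set()
--         while current and current not in seen_up:
--             seen_up.add(current)
--             if current in node_ids:
--                 impacted.add(current)
--             current = parent_by_id.get(current)
--
--         stack = [changed_id]
--         seen_down = set()
--         while stack:
--             node_id = stack.pop()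
--             if node_id in seen_down:
--                 continue
--             seen_down.add(node_id)
--             impacted.add(node_id)
--             for child_id in children_by_parent.get(node_id, []):
--                 stack.append(child_id)
--
--     return impacted
-- ===== SOURCE B (Python) =====
-- def _ancestor_chain(node_ids, parent_by_id, cur, seen):
--     # pure recursion up the parent chain; stops on missing/empty parent or a cycle
--     if not cur or cur in seen:
--         return []
--     rest = _ancestor_chain(node_ids, parent_by_id, parent_by_id.get(cur), seen | {cur})
--     return [cur] + rest if cur in node_ids else rest
--
--
-- def _emit_subtree(children_newest_first, node, visited):
--     # pure recursive preorder emission of the subtree rooted at node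
--     if node in visited:
--         return []
--     visited.add(node)
--     order = [node]
--     for child in children_newest_first.get(node, []):
--         order += _emit_subtree(children_newest_first, child, visited)
--     return order
--
--
-- def compute_impact_domain(changed_node_ids, nodes):
--     node_ids = set()
--     parent_by_id = {}
--     children_newest_first = {}
--     for node in nodes:
--         node_id = node.get("id")
--         if not node_id:
--             continue
--         node_ids.add(node_id)
--         parent_id = node.get("parent_id")
--         parent_by_id[node_id] = parent_id
--         if parent_id:
--             children_newest_first[parent_id] = [node_id] + children_newest_first.get(parent_id, [])
--     order = []
--     for changed_id in changed_node_ids or []: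
--         if changed_id in node_ids:
--             order.append(changed_id)
--             order.extend(_ancestor_chain(node_ids, parent_by_id, parent_by_id.get(changed_id), set()))
--             order.extend(_emit_subtree(children_newest_first, changed_id, set()))
--     return set(order)
-- ===== Notes on version B (the rewrite author's own statement) =====
-- stated objective: alternative
-- what changed: B replaces A's imperative while-loop climb and explicit-stack DFS that grow a shared impacted set with pure recursive enumeration: it emits an ordered list (seed, recursive ancestor chain, recursively emitted subtree over a newest-first children index built by prepending) and deduplicates once with a single set() at the end.
import Mathlib
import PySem

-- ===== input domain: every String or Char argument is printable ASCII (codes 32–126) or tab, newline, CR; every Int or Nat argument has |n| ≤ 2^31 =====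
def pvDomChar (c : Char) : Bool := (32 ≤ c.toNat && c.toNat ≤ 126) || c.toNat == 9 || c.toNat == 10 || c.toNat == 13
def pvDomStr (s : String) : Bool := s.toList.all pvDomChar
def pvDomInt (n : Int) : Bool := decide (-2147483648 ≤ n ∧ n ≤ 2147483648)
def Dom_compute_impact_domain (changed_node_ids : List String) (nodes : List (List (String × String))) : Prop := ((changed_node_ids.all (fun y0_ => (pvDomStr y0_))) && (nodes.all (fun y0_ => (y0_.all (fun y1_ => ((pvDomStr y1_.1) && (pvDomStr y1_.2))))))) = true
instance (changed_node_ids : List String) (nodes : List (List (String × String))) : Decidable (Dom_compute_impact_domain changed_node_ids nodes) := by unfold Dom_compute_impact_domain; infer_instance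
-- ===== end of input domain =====

-- B re-implements the collection as pure recursive enumeration: it emits an ordered list
-- (seed, recursive ancestor chain, recursively emitted subtree over a newest-first children
-- index) and deduplicates ONCE with a final set(), instead of A's imperative while/stack
-- traversals growing a shared impacted set (objective: alternative; same asymptotic cost).
-- Both Lean traversal loops use explicit fuel (proved sufficient below); Python has no fuel.

-- shared by both ports: dict.get(k) where the stored value is itself Optional
def pvGetOpt (par : PySem.Dict String (Option String)) (c : String) : Option String :=
  match PySem.Dict.get? par c with
  | some v => v
  | none => none

def pvFuel (nodes : List (List (String × String))) : Nat :=
  (nodes.length + 2) * (nodes.length + 2)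

-- ===== PORT A =====
-- _get_field(item, "f") for a dict item = item.get("f")  (nodes are dicts here)
def pv_get_field (item : List (String × String)) (field : String) : Option String :=
  (PySem.Dict.mk item).get? field

-- the first loop of A: node_ids, parent_by_id, children_by_parent (defaultdict-append)
def pvBuildA (nodes : List (List (String × String))) :
    PySem.Set String × PySem.Dict String (Option String) × PySem.Dict String (List String) :=
  nodes.foldl (fun st node =>
    match pv_get_field node "id" with
    | none => st
    | some nid =>
      if nid == "" then st
      else
        let ids := PySem.Set.add st.1 nid
        let p := pv_get_field node "parent_id"
        let par := st.2.1.insert nid p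
        let ch := match p with
          | some ps => if ps == "" then st.2.2 else st.2.2.modify ps [] (· ++ [nid])
          | none => st.2.2
        (ids, par, ch))
    (PySem.Set.empty, PySem.Dict.empty, PySem.Dict.empty)

-- A's upward while-loop (fresh seen_up per changed id); fuel-0 returns the state reached
def pvUpA (ids : PySem.Set String) (par : PySem.Dict String (Option String)) :
    Nat → Option String → PySem.Set String → PySem.Set String → PySem.Set String
  | 0, _, _, imp => imp
  | f + 1, cur, seen, imp =>
    match cur with
    | none => imp
    | some c =>
      if c == "" then imp
      else if PySem.Set.contains seen c then imp
      else
        pvUpA ids par f (pvGetOpt par c) (PySem.Set.add seen c)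
          (if PySem.Set.contains ids c then PySem.Set.add imp c else imp)

-- A's downward stack loop (fresh seen_down per changed id); stack top at the head,
-- so Python's extend-then-pop-from-the-end is 'children.reverse ++ rest'
def pvDownA (ch : PySem.Dict String (List String)) :
    Nat → List String → PySem.Set String → PySem.Set String → PySem.Set String
  | 0, _, _, imp => imp
  | f + 1, stack, seen, imp =>
    match stack with
    | [] => imp
    | v :: rest =>
      if PySem.Set.contains seen v then pvDownA ch f rest seen imp
      else pvDownA ch f ((ch.getD v []).reverse ++ rest)
        (PySem.Set.add seen v) (PySem.Set.add imp v)

def compute_impact_domain (changed_node_ids : List String) (nodes : List (List (String × String))) : List String :=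
  let m := pvBuildA nodes
  changed_node_ids.foldl (fun impacted changed_id =>
    if PySem.Set.contains m.1 changed_id then
      let impacted := PySem.Set.add impacted changed_id
      let impacted := pvUpA m.1 m.2.1 (pvFuel nodes) (pvGetOpt m.2.1 changed_id) PySem.Set.empty impacted
      pvDownA m.2.2 (pvFuel nodes) [changed_id] PySem.Set.empty impacted
    else impacted) PySem.Set.empty

-- ===== PORT B =====
-- _ancestor_chain: pure recursion up the parent chain, returning the chain as a list
def pvAnc (ids : PySem.Set String) (par : PySem.Dict String (Option String)) :
    Nat → Option String → PySem.Set String → List String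
  | 0, _, _ => []
  | f + 1, cur, seen =>
    match cur with
    | none => []
    | some c =>
      if c == "" then []
      else if PySem.Set.contains seen c then []
      else
        let rest := pvAnc ids par f (pvGetOpt par c) (PySem.Set.add seen c)
        if PySem.Set.contains ids c then c :: rest else rest

-- _emit_subtree: pure recursive preorder emission, threading the visited set
def pvSub (ch : PySem.Dict String (List String)) :
    Nat → String → PySem.Set String → List String × PySem.Set String
  | 0, _, vis => ([], vis)
  | f + 1, x, vis =>
    if PySem.Set.contains vis x then ([], vis)
    else (ch.getD x []).foldl
      (fun st c =>
        let p := pvSub ch f c st.2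
        (st.1 ++ p.1, p.2))
      ([x], PySem.Set.add vis x)

-- B's first loop: node.get(...) directly; children index built NEWEST FIRST by prepending
def pvBuildB (nodes : List (List (String × String))) :
    PySem.Set String × PySem.Dict String (Option String) × PySem.Dict String (List String) :=
  nodes.foldl (fun st node =>
    match (PySem.Dict.mk node).get? "id" with
    | none => st
    | some nid =>
      if nid == "" then st
      else
        let ids := PySem.Set.add st.1 nid
        let p := (PySem.Dict.mk node).get? "parent_id"
        let par := st.2.1.insert nid p
        let ch := match p with
          | some ps => if ps == "" then st.2.2 else st.2.2.insert ps (nid :: st.2.2.getD ps [])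
          | none => st.2.2
        (ids, par, ch))
    (PySem.Set.empty, PySem.Dict.empty, PySem.Dict.empty)

def compute_impact_domain_alt (changed_node_ids : List String) (nodes : List (List (String × String))) : List String :=
  let m := pvBuildB nodes
  let order := changed_node_ids.foldl (fun acc changed_id =>
    if PySem.Set.contains m.1 changed_id then
      acc ++ changed_id ::
        (pvAnc m.1 m.2.1 (pvFuel nodes) (pvGetOpt m.2.1 changed_id) PySem.Set.empty
          ++ (pvSub m.2.2 (pvFuel nodes) changed_id PySem.Set.empty).1)
    else acc) []
  PySem.Set.ofList order

-- ===== PRECONDITION & SPEC =====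
def Spec_compute_impact_domain (changed_node_ids : List String) (nodes : List (List (String × String))) (out : List String) : Prop := out = compute_impact_domain_alt changed_node_ids nodes
instance (changed_node_ids : List String) (nodes : List (List (String × String))) (out : List String) : Decidable (Spec_compute_impact_domain changed_node_ids nodes out) := by unfold Spec_compute_impact_domain; infer_instance

-- ===== CLAIM (what is proved, stated in full; the proofs are below) =====
def Claim_equal_compute_impact_domain : Prop := ∀ (changed_node_ids : List String) (nodes : List (List (String × String))), Dom_compute_impact_domain changed_node_ids nodes → Spec_compute_impact_domain changed_node_ids nodes (compute_impact_domain changed_node_ids nodes)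

-- ===== LEMMAS AND PROOFS =====

theorem pvUpdate_cons (s : PySem.Set String) (x : String) (l : List String) :
    PySem.Set.update s (x :: l) = PySem.Set.update (PySem.Set.add s x) l := rfl

theorem pvUpdate_append (s : PySem.Set String) (l1 l2 : List String) :
    PySem.Set.update s (l1 ++ l2) = PySem.Set.update (PySem.Set.update s l1) l2 := by
  simp [PySem.Set.update]

-- A's up loop is B's pure ancestor chain folded into the impacted set
theorem pvUp_eq (ids : PySem.Set String) (par : PySem.Dict String (Option String)) :
    ∀ (f : Nat) (cur : Option String) (seen imp : PySem.Set String),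
      pvUpA ids par f cur seen imp = PySem.Set.update imp (pvAnc ids par f cur seen) := by
  intro f
  induction f with
  | zero => intro cur seen imp; rfl
  | succ f ih =>
    intro cur seen imp
    cases cur with
    | none => rfl
    | some c =>
      show (if c == "" then imp
            else if PySem.Set.contains seen c then imp
            else pvUpA ids par f (pvGetOpt par c) (PySem.Set.add seen c)
              (if PySem.Set.contains ids c then PySem.Set.add imp c else imp))
          = PySem.Set.update imp
              (if c == "" then []
               else if PySem.Set.contains seen c then []
               else
                 let rest := pvAnc ids par f (pvGetOpt par c) (PySem.Set.add seen c)
                 if PySem.Set.contains ids c then c :: rest else rest)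
      split_ifs with h1 h2 h3
      · rfl
      · rfl
      · rw [ih, pvUpdate_cons]
      · rw [ih]

-- counting helpers (fuel sufficiency)
theorem pvCount_le_of_subset (cand : List String) (s t : PySem.Set String)
    (hsub : ∀ y ∈ s, y ∈ t) :
    cand.countP (fun k => !(PySem.Set.contains t k)) ≤
      cand.countP (fun k => !(PySem.Set.contains s k)) := by
  apply List.countP_mono_left
  intro a _ h
  cases hc : PySem.Set.contains s a with
  | false => rfl
  | true =>
    have : PySem.Set.contains t a = true :=
      (PySem.Set.contains_iff t a).2 (hsub a ((PySem.Set.contains_iff s a).1 hc))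
    rw [this] at h; simp at h

theorem pvCount_le_mono (cand : List String) (s : PySem.Set String) (x : String) :
    cand.countP (fun k => !(PySem.Set.contains (PySem.Set.add s x) k)) ≤
      cand.countP (fun k => !(PySem.Set.contains s k)) :=
  pvCount_le_of_subset cand s (PySem.Set.add s x)
    (fun y hy => (PySem.Set.mem_add s x y).2 (Or.inl hy))

theorem pvCount_lt (cand : List String) (s : PySem.Set String) (x : String)
    (hx : x ∈ cand) (hxs : x ∉ s) :
    cand.countP (fun k => !(PySem.Set.contains (PySem.Set.add s x) k)) <
      cand.countP (fun k => !(PySem.Set.contains s k)) := by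
  induction cand with
  | nil => simp at hx
  | cons a rest ih =>
    rcases List.mem_cons.1 hx with rfl | hx'
    · have h1 : (PySem.Set.contains (PySem.Set.add s x) x) = true := by
        rw [PySem.Set.contains_iff, PySem.Set.mem_add]; exact Or.inr rfl
      have h2 : (PySem.Set.contains s x) = false := by
        rw [Bool.eq_false_iff]; intro h; exact hxs ((PySem.Set.contains_iff s x).1 h)
      have := pvCount_le_mono rest s x
      simp [hxs] at this ⊢
      omega
    · have := ih hx'
      have hm := pvCount_le_mono [a] s x
      simp [List.countP_cons, List.countP_nil] at this hm ⊢
      omega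

-- sequential processing of a worklist by pvSub (proof-side helper)
def pvSubStack (ch : PySem.Dict String (List String)) (f : Nat) :
    List String → PySem.Set String → List String × PySem.Set String
  | [], vis => ([], vis)
  | v :: rest, vis =>
    ((pvSub ch f v vis).1 ++ (pvSubStack ch f rest (pvSub ch f v vis).2).1,
     (pvSubStack ch f rest (pvSub ch f v vis).2).2)

theorem pvSub_fold (ch : PySem.Dict String (List String)) (f : Nat) :
    ∀ (cs a0 : List String) (vis : PySem.Set String),
      cs.foldl (fun st c =>
          let p := pvSub ch f c st.2
          (st.1 ++ p.1, p.2)) (a0, vis)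
        = (a0 ++ (pvSubStack ch f cs vis).1, (pvSubStack ch f cs vis).2) := by
  intro cs
  induction cs with
  | nil => intro a0 vis; simp [pvSubStack]
  | cons c cs ih =>
    intro a0 vis
    rw [List.foldl_cons]
    show cs.foldl _ (a0 ++ (pvSub ch f c vis).1, (pvSub ch f c vis).2) = _
    rw [ih]
    simp [pvSubStack, List.append_assoc]

theorem pvSub_succ_not_mem (ch : PySem.Dict String (List String)) (f : Nat) (x : String)
    (vis : PySem.Set String) (h : PySem.Set.contains vis x = false) :
    pvSub ch (f + 1) x vis
      = (x :: (pvSubStack ch f (ch.getD x []) (PySem.Set.add vis x)).1,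
         (pvSubStack ch f (ch.getD x []) (PySem.Set.add vis x)).2) := by
  show (if PySem.Set.contains vis x then ([], vis)
        else (ch.getD x []).foldl
          (fun st c =>
            let p := pvSub ch f c st.2
            (st.1 ++ p.1, p.2))
          ([x], PySem.Set.add vis x)) = _
  rw [h]
  simp only [Bool.false_eq_true, if_false]
  rw [pvSub_fold]
  simp

theorem pvSubStack_append (ch : PySem.Dict String (List String)) (f : Nat) :
    ∀ (l1 l2 : List String) (vis : PySem.Set String),
      pvSubStack ch f (l1 ++ l2) vis
        = ((pvSubStack ch f l1 vis).1 ++ (pvSubStack ch f l2 (pvSubStack ch f l1 vis).2).1,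
           (pvSubStack ch f l2 (pvSubStack ch f l1 vis).2).2) := by
  intro l1
  induction l1 with
  | nil => intro l2 vis; simp [pvSubStack]
  | cons v rest ih =>
    intro l2 vis
    simp [pvSubStack, ih, List.append_assoc]

-- the visited set only grows, and grows only within ids
theorem pvSubStack_mono (ids : PySem.Set String) (ch : PySem.Dict String (List String))
    (hchid : ∀ p : String, ∀ c ∈ ch.getD p [], c ∈ ids) :
    ∀ (f : Nat) (stack : List String) (vis : PySem.Set String),
      (∀ x ∈ stack, x ∈ ids) →
      (∀ y ∈ vis, y ∈ (pvSubStack ch f stack vis).2) ∧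
      (∀ y ∈ (pvSubStack ch f stack vis).2, y ∈ vis ∨ y ∈ ids) := by
  intro f
  induction f with
  | zero =>
    intro stack
    induction stack with
    | nil => intro vis _; exact ⟨fun y hy => hy, fun y hy => Or.inl hy⟩
    | cons v rest ih =>
      intro vis hst
      have hsub : pvSub ch 0 v vis = ([], vis) := rfl
      have : pvSubStack ch 0 (v :: rest) vis
          = (([] : List String) ++ (pvSubStack ch 0 rest vis).1, (pvSubStack ch 0 rest vis).2) := by
        simp [pvSubStack, hsub]
      rw [this]
      exact ih vis (fun x hx => hst x (by simp [hx]))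
  | succ g ihf =>
    intro stack
    induction stack with
    | nil => intro vis _; exact ⟨fun y hy => hy, fun y hy => Or.inl hy⟩
    | cons v rest ih =>
      intro vis hst
      have hp : (∀ y ∈ vis, y ∈ (pvSub ch (g + 1) v vis).2) ∧
          (∀ y ∈ (pvSub ch (g + 1) v vis).2, y ∈ vis ∨ y ∈ ids) := by
        by_cases hv : PySem.Set.contains vis v = true
        · have : pvSub ch (g + 1) v vis = ([], vis) := by
            show (if PySem.Set.contains vis v then ([], vis) else _) = _
            rw [if_pos hv]
          rw [this]
          exact ⟨fun y hy => hy, fun y hy => Or.inl hy⟩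
        · have hv' : PySem.Set.contains vis v = false := by simpa using hv
          rw [pvSub_succ_not_mem ch g v vis hv']
          have hm := ihf (ch.getD v []) (PySem.Set.add vis v) (hchid v)
          constructor
          · intro y hy
            exact hm.1 y ((PySem.Set.mem_add vis v y).2 (Or.inl hy))
          · intro y hy
            rcases hm.2 y hy with h | h
            · rcases (PySem.Set.mem_add vis v y).1 h with h' | rfl
              · exact Or.inl h'
              · exact Or.inr (hst y (by simp))
            · exact Or.inr h
      have hq := ih ((pvSub ch (g + 1) v vis).2) (fun x hx => hst x (by simp [hx]))
      have hshape : pvSubStack ch (g + 1) (v :: rest) vis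
          = ((pvSub ch (g + 1) v vis).1 ++ (pvSubStack ch (g + 1) rest (pvSub ch (g + 1) v vis).2).1,
             (pvSubStack ch (g + 1) rest (pvSub ch (g + 1) v vis).2).2) := rfl
      rw [hshape]
      constructor
      · intro y hy
        exact hq.1 y (hp.1 y hy)
      · intro y hy
        rcases hq.2 y hy with h | h
        · exact hp.2 y h
        · exact Or.inr h

-- one unit of extra fuel is irrelevant once the fuel covers the unvisited ids
theorem pvSubStack_step (ids : PySem.Set String) (ch : PySem.Dict String (List String))
    (hchid : ∀ p : String, ∀ c ∈ ch.getD p [], c ∈ ids) :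
    ∀ (f : Nat) (stack : List String) (vis : PySem.Set String),
      (∀ x ∈ stack, x ∈ ids) →
      ids.countP (fun v => !(PySem.Set.contains vis v)) + 1 ≤ f →
      pvSubStack ch (f + 1) stack vis = pvSubStack ch f stack vis := by
  intro f
  induction f with
  | zero => intro stack vis _ hb; omega
  | succ g ihf =>
    intro stack
    induction stack with
    | nil => intro vis _ _; rfl
    | cons v rest ih =>
      intro vis hst hb
      have hs : pvSub ch (g + 2) v vis = pvSub ch (g + 1) v vis := by
        by_cases hv : PySem.Set.contains vis v = true
        · show (if PySem.Set.contains vis v then ([], vis) else _)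
              = (if PySem.Set.contains vis v then ([], vis) else _)
          rw [if_pos hv, if_pos hv]
        · have hv' : PySem.Set.contains vis v = false := by simpa using hv
          have hvnm : v ∉ vis := fun h => hv ((PySem.Set.contains_iff vis v).2 h)
          have hvid : v ∈ ids := hst v (by simp)
          have hcnt := pvCount_lt ids vis v hvid hvnm
          rw [pvSub_succ_not_mem ch (g + 1) v vis hv', pvSub_succ_not_mem ch g v vis hv']
          rw [ihf (ch.getD v []) (PySem.Set.add vis v) (hchid v) (by omega)]
      have hmono := pvSubStack_mono ids ch hchid
      have hvis2 : ∀ y ∈ vis, y ∈ (pvSub ch (g + 1) v vis).2 := by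
        by_cases hv : PySem.Set.contains vis v = true
        · have : pvSub ch (g + 1) v vis = ([], vis) := by
            show (if PySem.Set.contains vis v then ([], vis) else _) = _
            rw [if_pos hv]
          rw [this]; exact fun y hy => hy
        · have hv' : PySem.Set.contains vis v = false := by simpa using hv
          rw [pvSub_succ_not_mem ch g v vis hv']
          intro y hy
          exact (hmono g (ch.getD v []) (PySem.Set.add vis v) (hchid v)).1 y
            ((PySem.Set.mem_add vis v y).2 (Or.inl hy))
      have hbrest : ids.countP (fun w => !(PySem.Set.contains ((pvSub ch (g + 1) v vis).2) w)) + 1 ≤ g + 1 := by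
        have := pvCount_le_of_subset ids vis ((pvSub ch (g + 1) v vis).2) hvis2
        omega
      have hshape1 : pvSubStack ch (g + 2) (v :: rest) vis
          = ((pvSub ch (g + 2) v vis).1 ++ (pvSubStack ch (g + 2) rest (pvSub ch (g + 2) v vis).2).1,
             (pvSubStack ch (g + 2) rest (pvSub ch (g + 2) v vis).2).2) := rfl
      have hshape2 : pvSubStack ch (g + 1) (v :: rest) vis
          = ((pvSub ch (g + 1) v vis).1 ++ (pvSubStack ch (g + 1) rest (pvSub ch (g + 1) v vis).2).1,
             (pvSubStack ch (g + 1) rest (pvSub ch (g + 1) v vis).2).2) := rfl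
      rw [hshape1, hshape2, hs]
      rw [ih ((pvSub ch (g + 1) v vis).2) (fun x hx => hst x (by simp [hx])) hbrest]

theorem pvSubStack_irr (ids : PySem.Set String) (ch : PySem.Dict String (List String))
    (hchid : ∀ p : String, ∀ c ∈ ch.getD p [], c ∈ ids) :
    ∀ (k f : Nat) (stack : List String) (vis : PySem.Set String),
      (∀ x ∈ stack, x ∈ ids) →
      ids.countP (fun v => !(PySem.Set.contains vis v)) + 1 ≤ f →
      pvSubStack ch (f + k) stack vis = pvSubStack ch f stack vis := by
  intro k
  induction k with
  | zero => intro f stack vis _ _; rfl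
  | succ k ih =>
    intro f stack vis hst hb
    have h1 : f + (k + 1) = (f + k) + 1 := rfl
    rw [h1, pvSubStack_step ids ch hchid (f + k) stack vis hst (by omega)]
    exact ih f stack vis hst hb

theorem pvSubStack_irr₂ (ids : PySem.Set String) (ch : PySem.Dict String (List String))
    (hchid : ∀ p : String, ∀ c ∈ ch.getD p [], c ∈ ids)
    (f g : Nat) (stack : List String) (vis : PySem.Set String)
    (hst : ∀ x ∈ stack, x ∈ ids)
    (hf : ids.countP (fun v => !(PySem.Set.contains vis v)) + 1 ≤ f)
    (hg : ids.countP (fun v => !(PySem.Set.contains vis v)) + 1 ≤ g) :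
    pvSubStack ch f stack vis = pvSubStack ch g stack vis := by
  rcases Nat.le_total f g with h | h
  · obtain ⟨k, rfl⟩ := Nat.exists_eq_add_of_le h
    rw [pvSubStack_irr ids ch hchid k f stack vis hst hf]
  · obtain ⟨k, rfl⟩ := Nat.exists_eq_add_of_le h
    rw [pvSubStack_irr ids ch hchid k g stack vis hst hg]

-- A's stack DFS equals the impacted-set fold of B's recursive emission
theorem pvDown_eq (ids : PySem.Set String) (ch chB : PySem.Dict String (List String)) (N : Nat)
    (hrev : ∀ p : String, chB.getD p [] = (ch.getD p []).reverse)
    (hchid : ∀ p : String, ∀ c ∈ ch.getD p [], c ∈ ids)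
    (hchlen : ∀ p : String, (ch.getD p []).length ≤ N) :
    ∀ (fA fB : Nat) (stack : List String) (vis imp : PySem.Set String),
      stack.length + (ids.countP (fun v => !(PySem.Set.contains vis v))) * (N + 1) ≤ fA →
      ids.countP (fun v => !(PySem.Set.contains vis v)) + 1 ≤ fB →
      (∀ x ∈ stack, x ∈ ids) →
      pvDownA ch fA stack vis imp = PySem.Set.update imp (pvSubStack chB fB stack vis).1 := by
  have hchidB : ∀ p : String, ∀ c ∈ chB.getD p [], c ∈ ids := by
    intro p c hc; rw [hrev p] at hc; exact hchid p c (List.mem_reverse.1 hc)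
  intro fA
  induction fA with
  | zero =>
    intro fB stack vis imp hfA _ _
    have hnil : stack = [] := by
      cases stack with
      | nil => rfl
      | cons a b => simp at hfA
    subst hnil
    show imp = PySem.Set.update imp (pvSubStack chB fB [] vis).1
    simp [pvSubStack]
  | succ f ih =>
    intro fB stack vis imp hfA hfB hst
    cases stack with
    | nil =>
      show imp = PySem.Set.update imp (pvSubStack chB fB [] vis).1
      simp [pvSubStack]
    | cons v rest =>
      obtain ⟨g, rfl⟩ : ∃ g, fB = g + 1 := ⟨fB - 1, by omega⟩
      rw [List.length_cons] at hfA
      have hvids : v ∈ ids := hst v (by simp)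
      show (if PySem.Set.contains vis v then pvDownA ch f rest vis imp
            else pvDownA ch f ((ch.getD v []).reverse ++ rest)
              (PySem.Set.add vis v) (PySem.Set.add imp v))
          = PySem.Set.update imp (pvSubStack chB (g + 1) (v :: rest) vis).1
      by_cases hv : PySem.Set.contains vis v = true
      · rw [if_pos hv]
        have hsub : pvSub chB (g + 1) v vis = ([], vis) := by
          show (if PySem.Set.contains vis v then ([], vis) else _) = _
          rw [if_pos hv]
        have hshape : pvSubStack chB (g + 1) (v :: rest) vis
            = (([] : List String) ++ (pvSubStack chB (g + 1) rest vis).1,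
               (pvSubStack chB (g + 1) rest vis).2) := by
          simp [pvSubStack, hsub]
        rw [hshape]
        simp only [List.nil_append]
        exact ih (g + 1) rest vis imp (by omega) hfB (fun x hx => hst x (by simp [hx]))
      · rw [if_neg hv]
        have hv' : PySem.Set.contains vis v = false := by simpa using hv
        have hvnm : v ∉ vis := fun h => hv ((PySem.Set.contains_iff vis v).2 h)
        have hcnt := pvCount_lt ids vis v hvids hvnm
        have hlenB : (chB.getD v []).length ≤ N := by
          rw [hrev v]; simpa using hchlen v
        have hAstack : (ch.getD v []).reverse ++ rest = chB.getD v [] ++ rest := by rw [hrev v]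
        rw [hAstack]
        have hmul : (ids.countP (fun w => !(PySem.Set.contains (PySem.Set.add vis v) w))) * (N + 1) + (N + 1)
            ≤ (ids.countP (fun w => !(PySem.Set.contains vis w))) * (N + 1) := by
          nlinarith
        have hitems : ∀ x ∈ chB.getD v [] ++ rest, x ∈ ids := by
          intro x hx
          rcases List.mem_append.1 hx with h | h
          · exact hchidB v x h
          · exact hst x (by simp [h])
        have hIH := ih g (chB.getD v [] ++ rest) (PySem.Set.add vis v) (PySem.Set.add imp v)
          (by rw [List.length_append]; omega)
          (by omega)
          hitems
        rw [hIH]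
        -- split the IH worklist and rebuild B's shape
        rw [pvSubStack_append]
        have hbridge := pvSub_succ_not_mem chB g v vis hv'
        have hshape : pvSubStack chB (g + 1) (v :: rest) vis
            = ((pvSub chB (g + 1) v vis).1 ++ (pvSubStack chB (g + 1) rest (pvSub chB (g + 1) v vis).2).1,
               (pvSubStack chB (g + 1) rest (pvSub chB (g + 1) v vis).2).2) := rfl
        rw [hshape, hbridge]
        have hmono := pvSubStack_mono ids chB hchidB g (chB.getD v []) (PySem.Set.add vis v) (hchidB v)
        have hvsub : ∀ y ∈ vis, y ∈ (pvSubStack chB g (chB.getD v []) (PySem.Set.add vis v)).2 :=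
          fun y hy => hmono.1 y ((PySem.Set.mem_add vis v y).2 (Or.inl hy))
        have hvaddsub : ∀ y ∈ PySem.Set.add vis v, y ∈ (pvSubStack chB g (chB.getD v []) (PySem.Set.add vis v)).2 :=
          fun y hy => hmono.1 y hy
        have hcnt2 := pvCount_le_of_subset ids (PySem.Set.add vis v)
          ((pvSubStack chB g (chB.getD v []) (PySem.Set.add vis v)).2) hvaddsub
        have hirr := pvSubStack_irr₂ ids chB hchidB g (g + 1) rest
          ((pvSubStack chB g (chB.getD v []) (PySem.Set.add vis v)).2)
          (fun x hx => hst x (by simp [hx]))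
          (by omega) (by omega)
        rw [← hirr]
        show PySem.Set.update (PySem.Set.add imp v) _ = PySem.Set.update imp _
        rw [← pvUpdate_cons]
        rfl

-- the two builds: same ids and parent map; B's children lists are A's reversed
theorem pvBuild_rel (nodes : List (List (String × String))) :
    (pvBuildB nodes).1 = (pvBuildA nodes).1 ∧
    (pvBuildB nodes).2.1 = (pvBuildA nodes).2.1 ∧
    ∀ p : String, (pvBuildB nodes).2.2.getD p [] = ((pvBuildA nodes).2.2.getD p []).reverse := by
  suffices h : ∀ (nodes : List (List (String × String)))
      (stA stB : PySem.Set String × PySem.Dict String (Option String) × PySem.Dict String (List String)),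
      stB.1 = stA.1 → stB.2.1 = stA.2.1 →
      (∀ p : String, stB.2.2.getD p [] = (stA.2.2.getD p []).reverse) →
      (nodes.foldl (fun st node =>
        match (PySem.Dict.mk node).get? "id" with
        | none => st
        | some nid =>
          if nid == "" then st
          else
            let ids := PySem.Set.add st.1 nid
            let p := (PySem.Dict.mk node).get? "parent_id"
            let par := st.2.1.insert nid p
            let ch := match p with
              | some ps => if ps == "" then st.2.2 else st.2.2.insert ps (nid :: st.2.2.getD ps [])
              | none => st.2.2
            (ids, par, ch)) stB).1
        = (nodes.foldl (fun st node =>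
        match pv_get_field node "id" with
        | none => st
        | some nid =>
          if nid == "" then st
          else
            let ids := PySem.Set.add st.1 nid
            let p := pv_get_field node "parent_id"
            let par := st.2.1.insert nid p
            let ch := match p with
              | some ps => if ps == "" then st.2.2 else st.2.2.modify ps [] (· ++ [nid])
              | none => st.2.2
            (ids, par, ch)) stA).1 ∧
      (nodes.foldl (fun st node =>
        match (PySem.Dict.mk node).get? "id" with
        | none => st
        | some nid =>
          if nid == "" then st
          else
            let ids := PySem.Set.add st.1 nid
            let p := (PySem.Dict.mk node).get? "parent_id"
            let par := st.2.1.insert nid p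
            let ch := match p with
              | some ps => if ps == "" then st.2.2 else st.2.2.insert ps (nid :: st.2.2.getD ps [])
              | none => st.2.2
            (ids, par, ch)) stB).2.1
        = (nodes.foldl (fun st node =>
        match pv_get_field node "id" with
        | none => st
        | some nid =>
          if nid == "" then st
          else
            let ids := PySem.Set.add st.1 nid
            let p := pv_get_field node "parent_id"
            let par := st.2.1.insert nid p
            let ch := match p with
              | some ps => if ps == "" then st.2.2 else st.2.2.modify ps [] (· ++ [nid])
              | none => st.2.2
            (ids, par, ch)) stA).2.1 ∧
      ∀ p : String, (nodes.foldl (fun st node =>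
        match (PySem.Dict.mk node).get? "id" with
        | none => st
        | some nid =>
          if nid == "" then st
          else
            let ids := PySem.Set.add st.1 nid
            let p := (PySem.Dict.mk node).get? "parent_id"
            let par := st.2.1.insert nid p
            let ch := match p with
              | some ps => if ps == "" then st.2.2 else st.2.2.insert ps (nid :: st.2.2.getD ps [])
              | none => st.2.2
            (ids, par, ch)) stB).2.2.getD p []
        = ((nodes.foldl (fun st node =>
        match pv_get_field node "id" with
        | none => st
        | some nid =>
          if nid == "" then st
          else
            let ids := PySem.Set.add st.1 nid
            let p := pv_get_field node "parent_id"
            let par := st.2.1.insert nid p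
            let ch := match p with
              | some ps => if ps == "" then st.2.2 else st.2.2.modify ps [] (· ++ [nid])
              | none => st.2.2
            (ids, par, ch)) stA).2.2.getD p []).reverse by
    exact h nodes (PySem.Set.empty, PySem.Dict.empty, PySem.Dict.empty)
      (PySem.Set.empty, PySem.Dict.empty, PySem.Dict.empty) rfl rfl
      (by intro p; rw [PySem.Dict.getD_empty]; simp)
  intro nodes
  induction nodes with
  | nil => intro stA stB h1 h2 h3; exact ⟨h1, h2, h3⟩
  | cons node rest ih =>
    intro stA stB h1 h2 h3
    rw [List.foldl_cons, List.foldl_cons]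
    apply ih
    all_goals {
      simp only [pv_get_field]
      cases hid : (PySem.Dict.mk node).get? "id" with
      | none => first | exact h1 | exact h2 | exact h3
      | some nid =>
        by_cases hne : nid = ""
        · subst hne; simp only [BEq.rfl, if_true]
          first | exact h1 | exact h2 | exact h3
        · have hb : (nid == "") = false := by simp [hne]
          simp only [hb, Bool.false_eq_true, if_false]
          first
          | exact congrArg (fun s => PySem.Set.add s nid) h1
          | exact congrArg (fun d => d.insert nid ((PySem.Dict.mk node).get? "parent_id")) h2
          | { intro p
              cases hpp : (PySem.Dict.mk node).get? "parent_id" with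
              | none => exact h3 p
              | some ps =>
                by_cases hps : ps = ""
                · subst hps; simp only [BEq.rfl, if_true]; exact h3 p
                · have hpb : (ps == "") = false := by simp [hps]
                  simp only [hpb, Bool.false_eq_true, if_false]
                  rw [PySem.Dict.getD_insert, PySem.Dict.getD_modify]
                  by_cases hq : p = ps
                  · rw [if_pos hq, if_pos hq]
                    rw [h3 ps]
                    simp
                  · rw [if_neg hq, if_neg hq]
                    exact h3 p }
    }

-- invariants of A's build: sizes bounded by the node count, children are node ids
def PvBuildInv (st : PySem.Set String × PySem.Dict String (Option String) × PySem.Dict String (List String))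
    (n : Nat) : Prop :=
  st.1.length ≤ n ∧
  (∀ p : String, (st.2.2.getD p []).length ≤ n) ∧
  (∀ p : String, ∀ c ∈ st.2.2.getD p [], c ∈ st.1)

theorem pvBuild_step (st : PySem.Set String × PySem.Dict String (Option String) × PySem.Dict String (List String))
    (node : List (String × String)) (n : Nat) (h : PvBuildInv st n) :
    PvBuildInv ((fun st node =>
      match pv_get_field node "id" with
      | none => st
      | some nid =>
        if nid == "" then st
        else
          let ids := PySem.Set.add st.1 nid
          let p := pv_get_field node "parent_id"
          let par := st.2.1.insert nid p
          let ch := match p with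
            | some ps => if ps == "" then st.2.2 else st.2.2.modify ps [] (· ++ [nid])
            | none => st.2.2
          (ids, par, ch)) st node) (n + 1) := by
  obtain ⟨h1, h3, h4⟩ := h
  have hmono : PvBuildInv st (n + 1) := ⟨by omega, fun p => le_trans (h3 p) (by omega), h4⟩
  cases hid : pv_get_field node "id" with
  | none => simpa [hid] using hmono
  | some nid =>
    by_cases hne : nid = ""
    · subst hne; simpa [hid] using hmono
    · have hb : (nid == "") = false := by simp [hne]
      have hlenadd : (PySem.Set.add st.1 nid).length ≤ st.1.length + 1 := by
        rw [PySem.Set.add_eq_ite]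
        split_ifs <;> simp
      have hsub : ∀ x ∈ st.1, x ∈ PySem.Set.add st.1 nid :=
        fun x hx => (PySem.Set.mem_add st.1 nid x).2 (Or.inl hx)
      cases hpp : pv_get_field node "parent_id" with
      | none =>
        have hred : ((fun st node =>
          match pv_get_field node "id" with
          | none => st
          | some nid =>
            if nid == "" then st
            else
              let ids := PySem.Set.add st.1 nid
              let p := pv_get_field node "parent_id"
              let par := st.2.1.insert nid p
              let ch := match p with
                | some ps => if ps == "" then st.2.2 else st.2.2.modify ps [] (· ++ [nid])
                | none => st.2.2
              (ids, par, ch)) st node)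
            = (PySem.Set.add st.1 nid, st.2.1.insert nid (pv_get_field node "parent_id"), st.2.2) := by
          simp only [hid, hb, Bool.false_eq_true, if_false, hpp]
        rw [hred]
        exact ⟨le_trans hlenadd (by omega), fun p => le_trans (h3 p) (by omega), fun p c hc => hsub c (h4 p c hc)⟩
      | some ps =>
        by_cases hps : ps = ""
        · subst hps
          have hred : ((fun st node =>
            match pv_get_field node "id" with
            | none => st
            | some nid =>
              if nid == "" then st
              else
                let ids := PySem.Set.add st.1 nid
                let p := pv_get_field node "parent_id"
                let par := st.2.1.insert nid p
                let ch := match p with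
                  | some ps => if ps == "" then st.2.2 else st.2.2.modify ps [] (· ++ [nid])
                  | none => st.2.2
                (ids, par, ch)) st node)
              = (PySem.Set.add st.1 nid, st.2.1.insert nid (pv_get_field node "parent_id"), st.2.2) := by
            simp only [hid, hb, Bool.false_eq_true, if_false, hpp]
            simp
          rw [hred]
          exact ⟨le_trans hlenadd (by omega), fun p => le_trans (h3 p) (by omega), fun p c hc => hsub c (h4 p c hc)⟩
        · have hpsb : (ps == "") = false := by simp [hps]
          have hred : ((fun st node =>
            match pv_get_field node "id" with
            | none => st
            | some nid =>
              if nid == "" then st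
              else
                let ids := PySem.Set.add st.1 nid
                let p := pv_get_field node "parent_id"
                let par := st.2.1.insert nid p
                let ch := match p with
                  | some ps => if ps == "" then st.2.2 else st.2.2.modify ps [] (· ++ [nid])
                  | none => st.2.2
                (ids, par, ch)) st node)
              = (PySem.Set.add st.1 nid, st.2.1.insert nid (pv_get_field node "parent_id"),
                  st.2.2.modify ps [] (· ++ [nid])) := by
            simp only [hid, hb, Bool.false_eq_true, if_false, hpp, hpsb]
          rw [hred]
          refine ⟨le_trans hlenadd (by omega), ?_, ?_⟩
          · intro p
            rw [PySem.Dict.getD_modify]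
            split_ifs with hq
            · subst hq
              simp only [List.length_append, List.length_cons, List.length_nil]
              have := h3 p
              omega
            · exact le_trans (h3 p) (by omega)
          · intro p c hc
            rw [PySem.Dict.getD_modify] at hc
            by_cases hq : p = ps
            · rw [if_pos hq] at hc
              rcases List.mem_append.1 hc with h | h
              · exact hsub c (h4 ps c h)
              · simp at h; subst h
                exact (PySem.Set.mem_add st.1 c c).2 (Or.inr rfl)
            · rw [if_neg hq] at hc
              exact hsub c (h4 p c hc)

theorem pvBuild_fold (nodes : List (List (String × String))) :
    ∀ (st : PySem.Set String × PySem.Dict String (Option String) × PySem.Dict String (List String)) (n : Nat),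
      PvBuildInv st n →
      PvBuildInv (nodes.foldl (fun st node =>
        match pv_get_field node "id" with
        | none => st
        | some nid =>
          if nid == "" then st
          else
            let ids := PySem.Set.add st.1 nid
            let p := pv_get_field node "parent_id"
            let par := st.2.1.insert nid p
            let ch := match p with
              | some ps => if ps == "" then st.2.2 else st.2.2.modify ps [] (· ++ [nid])
              | none => st.2.2
            (ids, par, ch)) st) (n + nodes.length) := by
  induction nodes with
  | nil => intro st n h; simpa using h
  | cons node rest ih =>
    intro st n h
    rw [List.foldl_cons]
    have := ih _ (n + 1) (pvBuild_step st node n h)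
    simpa [Nat.add_assoc, Nat.add_comm, Nat.add_left_comm] using this

theorem pvBuildA_inv (nodes : List (List (String × String))) :
    PvBuildInv (pvBuildA nodes) nodes.length := by
  have h0 : PvBuildInv (PySem.Set.empty, PySem.Dict.empty, PySem.Dict.empty) 0 := by
    refine ⟨by simp [PySem.Set.empty], ?_, ?_⟩
    · intro p; rw [PySem.Dict.getD_empty]; simp
    · intro p c hc; rw [PySem.Dict.getD_empty] at hc; simp at hc
  have := pvBuild_fold nodes (PySem.Set.empty, PySem.Dict.empty, PySem.Dict.empty) 0 h0
  simpa [pvBuildA] using this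

-- B's accumulator loop restated front-loaded
theorem pvFoldAcc (P : String → Bool) (g : String → List String) :
    ∀ (l : List String) (acc : List String),
      l.foldl (fun acc c => if P c then acc ++ g c else acc) acc
        = acc ++ l.foldl (fun acc c => if P c then acc ++ g c else acc) [] := by
  intro l
  induction l with
  | nil => intro acc; simp
  | cons x xs ih =>
    intro acc
    by_cases h : P x = true
    · simp only [List.foldl_cons, h, if_true]
      rw [ih (acc ++ g x), ih ([] ++ g x)]
      simp [List.append_assoc]
    · have h' : P x = false := by simpa using h
      simp only [List.foldl_cons, h', Bool.false_eq_true, if_false]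
      exact ih acc

-- the main loop: A's impacted fold equals one global dedup of B's emission list
theorem pvLoop (ids : PySem.Set String) (par : PySem.Dict String (Option String))
    (ch chB : PySem.Dict String (List String)) (N F : Nat)
    (hrev : ∀ p : String, chB.getD p [] = (ch.getD p []).reverse)
    (hchid : ∀ p : String, ∀ c ∈ ch.getD p [], c ∈ ids)
    (hchlen : ∀ p : String, (ch.getD p []).length ≤ N)
    (hidslen : ids.length ≤ N)
    (hF : N * (N + 1) + N + 2 ≤ F) :
    ∀ (changed : List String) (imp : PySem.Set String),
      changed.foldl (fun impacted changed_id =>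
        if PySem.Set.contains ids changed_id then
          let impacted := PySem.Set.add impacted changed_id
          let impacted := pvUpA ids par F (pvGetOpt par changed_id) PySem.Set.empty impacted
          pvDownA ch F [changed_id] PySem.Set.empty impacted
        else impacted) imp
      = PySem.Set.update imp (changed.foldl (fun acc changed_id =>
          if PySem.Set.contains ids changed_id then
            acc ++ changed_id ::
              (pvAnc ids par F (pvGetOpt par changed_id) PySem.Set.empty
                ++ (pvSub chB F changed_id PySem.Set.empty).1)
          else acc) []) := by
  intro changed
  induction changed with
  | nil => intro imp; rfl
  | cons c rest ih =>
    intro imp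
    rw [List.foldl_cons, List.foldl_cons]
    by_cases hc : PySem.Set.contains ids c = true
    · rw [if_pos hc, if_pos hc]
      have hcnt0 : ids.countP (fun v => !(PySem.Set.contains PySem.Set.empty v)) ≤ N :=
        le_trans List.countP_le_length hidslen
      have hdown := pvDown_eq ids ch chB N hrev hchid hchlen F F [c] PySem.Set.empty
        (pvUpA ids par F (pvGetOpt par c) PySem.Set.empty (PySem.Set.add imp c))
        (by simp only [List.length_cons, List.length_nil]; nlinarith)
        (by omega)
        (by intro x hx; simp at hx; subst hx; exact (PySem.Set.contains_iff ids x).1 hc)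
      rw [hdown, pvUp_eq]
      have hstack : (pvSubStack chB F [c] PySem.Set.empty).1
          = (pvSub chB F c PySem.Set.empty).1 ++ [] := by
        show ((pvSub chB F c PySem.Set.empty).1 ++ (pvSubStack chB F [] (pvSub chB F c PySem.Set.empty).2).1, _).1 = _
        simp [pvSubStack]
      rw [hstack, List.append_nil]
      rw [pvFoldAcc, ih, pvUpdate_append, List.nil_append, pvUpdate_cons, pvUpdate_append]
    · rw [if_neg hc, if_neg hc]
      exact ih imp

-- ===== VERDICT (by name: the statement is the Claim_ definition above) =====
theorem compute_impact_domain_spec : Claim_equal_compute_impact_domain := by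
  intro changed nodes _
  show compute_impact_domain changed nodes = compute_impact_domain_alt changed nodes
  simp only [compute_impact_domain, compute_impact_domain_alt]
  obtain ⟨hrel1, hrel2, hrev⟩ := pvBuild_rel nodes
  obtain ⟨h1, h3, h4⟩ := pvBuildA_inv nodes
  rw [hrel1, hrel2]
  have hF : nodes.length * (nodes.length + 1) + nodes.length + 2 ≤ pvFuel nodes := by
    unfold pvFuel; nlinarith
  rw [pvLoop (pvBuildA nodes).1 (pvBuildA nodes).2.1 (pvBuildA nodes).2.2 (pvBuildB nodes).2.2
    nodes.length (pvFuel nodes) hrev h4 h3 h1 hF changed PySem.Set.empty]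
  rw [show (PySem.Set.empty : PySem.Set String) = [] from rfl, PySem.Set.update_nil_left]
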